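-- pv_equiv track=rewrite | github.com/SushiRaj99/rbe-capstone | rbe_capstone/potr_rl/eval.py | _index_by_goal_occurrence
-- ===== SOURCE A (Python) =====
-- from collections import defaultdict
--
-- def _index_by_goal_occurrence(results):
--     # {(goal_id, k): result_dict} where k is 0-based occurrence count of goal_id.
--     indexed = {}
--     counts = defaultdict(int)
--     for r in results or []:
--         gid = r.get('goal_id') or ''
--         if not gid:
--             continue
--         k = counts[gid]
--         counts[gid] += 1
--         indexed[(gid, k)] = r
--     return indexed
-- ===== SOURCE B (Python) =====
-- from collections import defaultdict
--
-- def _index_by_goal_occurrence(results):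
--     # Different decomposition: (1) group the kept results per goal_id (with their
--     # original positions), (2) enumerate each group to assign occurrence indices,
--     # (3) sort the tagged entries by original position and emit the dict in that
--     # order.  Positions are distinct, so the sort restores A's insertion order.
--     groups = defaultdict(list)
--     for pos, r in enumerate(results or []):
--         gid = r.get('goal_id') or ''
--         if gid:
--             groups[gid].append((pos, r))
--     entries = []
--     for gid, occ in groups.items():
--         for k, (pos, r) in enumerate(occ):
--             entries.append((pos, (gid, k), r))
--     entries.sort(key=lambda t: t[0])
--     return {key: r for _pos, key, r in entries}
-- ===== Notes on version B (the rewrite author's own statement) =====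
-- stated objective: alternative
-- what changed: B replaces A's single incremental pass with a running per-goal counter by a group-then-enumerate-then-sort pipeline: it buckets kept results per goal_id into a defaultdict(list) together with their positions, assigns occurrence indices by enumerating each bucket, and sorts the tagged entries by original position to rebuild the dict in A's insertion order.
import Mathlib
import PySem

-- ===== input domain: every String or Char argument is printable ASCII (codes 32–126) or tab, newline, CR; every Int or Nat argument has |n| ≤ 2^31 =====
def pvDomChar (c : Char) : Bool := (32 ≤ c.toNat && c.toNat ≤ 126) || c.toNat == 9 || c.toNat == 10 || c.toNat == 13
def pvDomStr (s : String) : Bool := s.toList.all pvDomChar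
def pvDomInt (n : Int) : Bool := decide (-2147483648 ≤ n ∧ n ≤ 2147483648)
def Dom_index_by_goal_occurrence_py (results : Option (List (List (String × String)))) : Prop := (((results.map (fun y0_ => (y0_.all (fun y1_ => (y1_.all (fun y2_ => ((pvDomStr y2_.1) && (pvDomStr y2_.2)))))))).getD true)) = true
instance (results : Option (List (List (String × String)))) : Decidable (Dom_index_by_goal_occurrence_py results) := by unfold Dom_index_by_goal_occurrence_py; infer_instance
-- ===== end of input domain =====

-- B groups kept results per goal_id (with positions), enumerates each group for occurrence
-- indices, and sorts by position to rebuild A's insertion order; alternative decomposition,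
-- same return value.

-- shared helper: gid = r.get('goal_id') or ''  (falsy/missing value -> '')
def pvGid (r : List (String × String)) : String :=
  ((PySem.Dict.mk r).get? "goal_id").getD ""

-- ===== PORT A =====
def index_by_goal_occurrence_py (results : Option (List (List (String × String)))) : List (String × Int × List (String × String)) :=
  let rs := results.getD []
  -- indexed is kept as its items list (all inserted keys (gid, k) are fresh, so inserts append)
  (rs.foldl (fun (st : List (String × Int × List (String × String)) × PySem.Dict String Int) r =>
      let gid := pvGid r
      if gid = "" then st
      else
        let k := st.2.getD gid 0            -- counts[gid] (defaultdict int)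
        (st.1 ++ [(gid, k, r)], st.2.modify gid 0 (· + 1)))  -- counts[gid] += 1; indexed[(gid,k)] = r
    ([], PySem.Dict.empty)).1

-- ===== PORT B =====
def index_by_goal_occurrence_py_alt (results : Option (List (List (String × String)))) : List (String × Int × List (String × String)) :=
  let rs := results.getD []
  -- groups = defaultdict(list); for pos, r in enumerate(rs): if gid: groups[gid].append((pos, r))
  let groups := (PySem.List.enumerate rs 0).foldl
    (fun (d : PySem.Dict String (List (Int × List (String × String)))) p =>
      let gid := pvGid p.2
      if gid = "" then d else d.modify gid [] (fun x => x ++ [p]))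
    PySem.Dict.empty
  -- for gid, occ in groups.items(): for k, (pos, r) in enumerate(occ): entries.append((pos, (gid, k), r))
  let entries := groups.items.foldl
    (fun acc gp => acc ++ (PySem.List.enumerate gp.2 0).map (fun q => (q.2.1, (gp.1, q.1), q.2.2))) []
  -- entries.sort(key=lambda t: t[0]); the result dict is kept as its items list (keys (gid, k) fresh)
  (PySem.List.sorted entries (fun t => t.1)).map (fun t => (t.2.1.1, t.2.1.2, t.2.2))

-- ===== PRECONDITION & SPEC =====
def Spec_index_by_goal_occurrence_py (results : Option (List (List (String × String)))) (out : List (String × Int × List (String × String))) : Prop := out = index_by_goal_occurrence_py_alt results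
instance (results : Option (List (List (String × String)))) (out : List (String × Int × List (String × String))) : Decidable (Spec_index_by_goal_occurrence_py results out) := by unfold Spec_index_by_goal_occurrence_py; infer_instance

-- ===== CLAIM (what is proved, stated in full; the proofs are below) =====
def Claim_equal_index_by_goal_occurrence_py : Prop := ∀ (results : Option (List (List (String × String)))), Dom_index_by_goal_occurrence_py results → Spec_index_by_goal_occurrence_py results (index_by_goal_occurrence_py results)

-- ===== LEMMAS AND PROOFS =====

-- the kept (position, result) pairs, in original order
def pvKept (s : Int) (rs : List (List (String × String))) : List (Int × List (String × String)) :=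
  (PySem.List.enumerate rs s).filter (fun p => pvGid p.2 ≠ "")

-- canonical result: each kept pair tagged with its occurrence index (count of its gid so far)
def pvAssign (seen : List String) : List (Int × List (String × String)) → List (Int × (String × Int) × List (String × String))
  | [] => []
  | p :: t => (p.1, (pvGid p.2, (seen.count (pvGid p.2) : Int)), p.2) :: pvAssign (seen ++ [pvGid p.2]) t

theorem pvKept_cons (s : Int) (r : List (String × String)) (t : List (List (String × String))) :
    pvKept s (r :: t) = if pvGid r = "" then pvKept (s + 1) t else (s, r) :: pvKept (s + 1) t := by
  by_cases hg : pvGid r = "" <;>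
    simp [pvKept, PySem.List.enumerate_cons, hg]

-- A's loop produces exactly the canonical list (positions dropped)
theorem pvA_eq_assign (rs : List (List (String × String))) (s : Int)
    (acc : List (String × Int × List (String × String))) (d : PySem.Dict String Int)
    (seen : List String) (hinv : ∀ g, g ≠ "" → d.getD g 0 = (seen.count g : Int)) :
    (rs.foldl (fun st r =>
      let gid := pvGid r
      if gid = "" then st
      else
        let k := st.2.getD gid 0
        (st.1 ++ [(gid, k, r)], st.2.modify gid 0 (· + 1)))
      (acc, d)).1 = acc ++ (pvAssign seen (pvKept s rs)).map (fun t => (t.2.1.1, t.2.1.2, t.2.2)) := by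
  induction rs generalizing s acc d seen with
  | nil => simp [pvKept, pvAssign]
  | cons r t ih =>
    simp only [List.foldl_cons, pvKept_cons]
    by_cases hg : pvGid r = ""
    · simpa [hg] using ih (s + 1) acc d seen hinv
    · simp only [if_neg hg, pvAssign]
      have hinv' : ∀ g, g ≠ "" →
          (d.modify (pvGid r) 0 (· + 1)).getD g 0 = ((seen ++ [pvGid r]).count g : Int) := by
        intro g hgne
        rw [PySem.Dict.getD_modify]
        by_cases he : g = pvGid r
        · subst he; simp [hinv _ hgne, List.count_append]
        · have hnm : g ∉ ([pvGid r] : List String) := by simpa using he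
          simp [if_neg he, hinv g hgne, List.count_append, List.count_eq_zero.mpr hnm]
      rw [ih (s + 1) _ _ _ hinv', hinv _ hg]
      simp

-- the canonical list keeps the kept positions
theorem pvAssign_map_fst (seen : List String) (K : List (Int × List (String × String))) :
    (pvAssign seen K).map (fun t => t.1) = K.map (fun p => p.1) := by
  induction K generalizing seen with
  | nil => simp [pvAssign]
  | cons p t ih => simp [pvAssign, ih]

-- the canonical entries with goal id g are that goal's bucket, enumerated from seen.count g
theorem pvAssign_filter (seen : List String) (K : List (Int × List (String × String))) (g : String) :
    (pvAssign seen K).filter (fun t => t.2.1.1 == g)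
      = (PySem.List.enumerate (K.filter (fun p => pvGid p.2 == g)) (seen.count g)).map
          (fun q => (q.2.1, (g, q.1), q.2.2)) := by
  induction K generalizing seen with
  | nil => simp [pvAssign]
  | cons p t ih =>
    by_cases he : pvGid p.2 = g
    · have : ((seen ++ [pvGid p.2]).count g) = seen.count g + 1 := by
        simp [List.count_append, he]
      simp [pvAssign, he, PySem.List.enumerate_cons, ih]
    · have : ((seen ++ [pvGid p.2]).count g) = seen.count g := by
        have hnm : g ∉ ([pvGid p.2] : List String) := by
          simpa using fun h => he h.symm
        simp [List.count_append, List.count_eq_zero.mpr hnm]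
      simp [pvAssign, he, ih, this]

-- a list is a permutation of its partition along any duplicate-free covering key list
theorem pvPerm_partition {α : Type} (f : α → String) (ds : List String) (l : List α)
    (hnd : ds.Nodup) (hcov : ∀ x ∈ l, f x ∈ ds) :
    (ds.flatMap (fun g => l.filter (fun x => f x == g))).Perm l := by
  induction ds generalizing l with
  | nil =>
    cases l with
    | nil => simp
    | cons x t => exact absurd (hcov x (by simp)) (by simp)
  | cons g ds' ih =>
    obtain ⟨hg, hnd'⟩ := List.nodup_cons.mp hnd
    simp only [List.flatMap_cons]
    have hstep : ∀ g' ∈ ds', l.filter (fun x => f x == g')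
        = (l.filter (fun x => !(f x == g))).filter (fun x => f x == g') := by
      intro g' hg'
      rw [List.filter_filter]
      apply List.filter_congr
      intro x hx
      by_cases he : f x = g'
      · have hgg : g' ≠ g := fun h => hg (h ▸ hg')
        simp [he, hgg]
      · simp [he]
    have hperm' : (ds'.flatMap (fun g' => l.filter (fun x => f x == g'))).Perm
        (l.filter (fun x => !(f x == g))) := by
      rw [List.flatMap_congr hstep]
      apply ih _ hnd'
      intro x hx
      have hm := List.of_mem_filter hx
      have hc := hcov x (List.mem_of_mem_filter hx)
      simp only [List.mem_cons] at hc
      rcases hc with h | h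
      · simp [h] at hm
      · exact h
    exact (List.Perm.append_left _ hperm').trans (List.filter_append_perm _ l)

-- B's grouping loop is the canonical modify-fold over the kept (gid, (pos, r)) pairs
theorem pvGroups_eq (rs : List (List (String × String))) (s : Int)
    (d : PySem.Dict String (List (Int × List (String × String)))) :
    (PySem.List.enumerate rs s).foldl
      (fun d p =>
        let gid := pvGid p.2
        if gid = "" then d else d.modify gid [] (fun x => x ++ [p])) d
    = ((pvKept s rs).map (fun p => (pvGid p.2, p))).foldl
        (fun d q => d.modify q.1 [] (fun x => x ++ [q.2])) d := by
  induction rs generalizing s d with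
  | nil => simp [pvKept]
  | cons r t ih =>
    rw [PySem.List.enumerate_cons, pvKept_cons]
    by_cases hg : pvGid r = ""
    · simpa [hg] using ih (s + 1) d
    · simp only [if_neg hg, List.foldl_cons, List.map_cons]
      exact ih (s + 1) _

-- every canonical entry's goal id is a kept goal id
theorem pvAssign_key_mem (seen : List String) (K : List (Int × List (String × String))) :
    ∀ t ∈ pvAssign seen K, t.2.1.1 ∈ K.map (fun p => pvGid p.2) := by
  induction K generalizing seen with
  | nil => simp [pvAssign]
  | cons p t ih =>
    intro u hu
    simp only [pvAssign, List.mem_cons] at hu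
    rcases hu with h | h
    · simp [h]
    · simp [ih _ u h]

theorem pvMain (rs : List (List (String × String))) :
    (PySem.List.sorted
      (((PySem.List.enumerate rs 0).foldl
          (fun (d : PySem.Dict String (List (Int × List (String × String)))) p =>
            let gid := pvGid p.2
            if gid = "" then d else d.modify gid [] (fun x => x ++ [p]))
          PySem.Dict.empty).items.foldl
        (fun acc gp => acc ++ (PySem.List.enumerate gp.2 0).map (fun q => (q.2.1, (gp.1, q.1), q.2.2))) [])
      (fun t => t.1))
    = pvAssign [] (pvKept 0 rs) := by
  set K := pvKept 0 rs with hK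
  set L := K.map (fun p => (pvGid p.2, p)) with hL
  set T := pvAssign [] K with hT
  have hgroups := pvGroups_eq rs 0 PySem.Dict.empty
  rw [hgroups]
  set groups := L.foldl (fun d q => d.modify q.1 [] (fun x => x ++ [q.2])) PySem.Dict.empty with hgr
  have hkeys : groups.keys = PySem.Set.ofList (L.map (fun q => q.1)) := by
    rw [hgr, PySem.Dict.keys_foldl_modify_key L (fun q => q.1) [] (fun d q => fun x => x ++ [q.2])
      PySem.Dict.empty, PySem.Dict.keys_empty]
    rfl
  have hnd : groups.keys.Nodup := by
    rw [hkeys]; exact PySem.Set.nodup_ofList _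
  have hgetD : ∀ g : String, groups.getD g [] = K.filter (fun p => pvGid p.2 == g) := by
    intro g
    rw [hgr, PySem.Dict.getD_foldl_modify_append L PySem.Dict.empty g, PySem.Dict.getD_empty]
    rw [hL, List.filter_map, List.map_map]
    simp [Function.comp_def]
  have hitems := PySem.Dict.items_eq_map_keys groups hnd []
  rw [hitems, PySem.List.foldl_append_eq_flatMap, List.nil_append, List.flatMap_map]
  have hblk : ∀ g ∈ groups.keys,
      (PySem.List.enumerate (groups.getD g []) 0).map (fun q => (q.2.1, (g, q.1), q.2.2))
        = T.filter (fun t => t.2.1.1 == g) := by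
    intro g _
    rw [hgetD g, hT, pvAssign_filter [] K g]
    simp
  rw [List.flatMap_congr hblk]
  have hperm : (groups.keys.flatMap (fun g => T.filter (fun t => t.2.1.1 == g))).Perm T := by
    apply pvPerm_partition (fun t => t.2.1.1) groups.keys T hnd
    intro t ht
    rw [hkeys, PySem.Set.mem_ofList]
    have := pvAssign_key_mem [] K t ht
    simpa [hL, List.map_map, Function.comp_def] using this
  have hpw : T.Pairwise (fun a b => a.1 < b.1) := by
    have hKpw : K.Pairwise (fun p q => p.1 < q.1) := by
      rw [hK]
      exact List.Pairwise.filter _ (PySem.List.pairwise_lt_enumerate rs 0)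
    have hmapK : (K.map (fun p => p.1)).Pairwise (· < ·) := List.pairwise_map.mpr hKpw
    have hmapT : (T.map (fun t => t.1)).Pairwise (· < ·) := by
      rw [hT, pvAssign_map_fst]; exact hmapK
    exact List.pairwise_map.mp hmapT
  exact PySem.List.sorted_eq_of_perm_of_pairwise_lt _ T (fun t => t.1) hperm.symm hpw

theorem index_by_goal_occurrence_py_spec : Claim_equal_index_by_goal_occurrence_py := by
  intro results _
  unfold Spec_index_by_goal_occurrence_py index_by_goal_occurrence_py index_by_goal_occurrence_py_alt
  have hA := pvA_eq_assign (results.getD []) 0 [] PySem.Dict.empty []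
    (by intro g _; simp [PySem.Dict.getD_empty])
  have hB := pvMain (results.getD [])
  simp only [hA, List.nil_append, hB]
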